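-- pv_equiv track=rewrite | github.com/manuelsousa7/ia-project | parte2/P1/classsol.py | sameLetters
-- ===== SOURCE A (Python) =====
-- def sameLetters(X):
--     trueList = ["útil"]
--     falseList = ["rir","seara"]
--     dic = {}
--     countT = countF = 0
--     for i in trueList:
--         for l in i:
--             dic[l] = True
--     for i in falseList:
--         for l in i:
--             dic[l] = False
--     for l in X:
--         if(l not in dic or dic[l] == False):
--             countF += 1
--         else:
--             countT += 1
--     return countT > countF
-- ===== SOURCE B (Python) =====
-- def sameLetters(X):
--     # Frequency-table formulation: tabulate X once, then look up the three
--     # letters that end up True in A's dict ('i' is overwritten to False there).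
--     freq = {}
--     for c in X:
--         freq[c] = freq.get(c, 0) + 1
--     t = freq.get('ú', 0) + freq.get('t', 0) + freq.get('l', 0)
--     return t > len(X) - t
-- ===== Notes on version B (the rewrite author's own statement) =====
-- stated objective: simpler
-- what changed: Replaces A's dict of per-letter True/False flags and per-element branch counting by a frequency table built in one pass plus a fixed three-key lookup (t = #ú + #t + #l, compared against len(X) - t).
import Mathlib
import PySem

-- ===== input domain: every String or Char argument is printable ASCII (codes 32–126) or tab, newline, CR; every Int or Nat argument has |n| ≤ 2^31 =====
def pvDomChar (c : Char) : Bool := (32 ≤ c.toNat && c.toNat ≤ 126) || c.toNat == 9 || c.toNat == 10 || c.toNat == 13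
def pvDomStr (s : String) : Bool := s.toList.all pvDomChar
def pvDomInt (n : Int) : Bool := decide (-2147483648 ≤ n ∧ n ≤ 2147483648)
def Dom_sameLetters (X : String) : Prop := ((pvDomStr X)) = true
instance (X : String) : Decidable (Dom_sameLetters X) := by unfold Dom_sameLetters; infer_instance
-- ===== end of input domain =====

-- B builds a frequency table of X in one pass and compares the summed counts of the
-- three letters A's dict maps to True ('ú','t','l' — 'i' is overwritten to False) with the rest.

-- ===== PORT A =====
def sameLetters (X : String) : Bool :=
  let trueList : List String := ["útil"]
  let falseList : List String := ["rir", "seara"]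
  let dic : PySem.Dict Char Bool := PySem.Dict.empty
  let dic := trueList.foldl (fun d i => i.toList.foldl (fun d l => d.insert l true) d) dic
  let dic := falseList.foldl (fun d i => i.toList.foldl (fun d l => d.insert l false) d) dic
  let c := X.toList.foldl (fun (c : Int × Int) l =>
      if ¬ (dic.contains l) = true ∨ dic.getD l true = false then (c.1, c.2 + 1)
      else (c.1 + 1, c.2)) (0, 0)
  decide (c.1 > c.2)

-- ===== PORT B =====
def sameLetters_alt (X : String) : Bool :=
  let freq : PySem.Dict Char Int :=
    X.toList.foldl (fun d c => d.insert c (d.getD c 0 + 1)) PySem.Dict.empty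
  let t := freq.getD 'ú' 0 + freq.getD 't' 0 + freq.getD 'l' 0
  decide (t > (PySem.Str.len X : Int) - t)

-- ===== PRECONDITION & SPEC =====
def Spec_sameLetters (X : String) (out : Bool) : Prop := out = sameLetters_alt X
instance (X : String) (out : Bool) : Decidable (Spec_sameLetters X out) := by unfold Spec_sameLetters; infer_instance

-- ===== CLAIM (what is proved, stated in full; the proofs are below) =====
def Claim_equal_sameLetters : Prop := ∀ (X : String), Dom_sameLetters X → Spec_sameLetters X (sameLetters X)

-- ===== LEMMAS AND PROOFS =====

-- the concrete dictionary A builds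
def pvDicA : PySem.Dict Char Bool :=
  (["rir", "seara"] : List String).foldl (fun d i => i.toList.foldl (fun d l => d.insert l false) d)
    ((["útil"] : List String).foldl (fun d i => i.toList.foldl (fun d l => d.insert l true) d)
      PySem.Dict.empty)

def pvIsTrue (l : Char) : Bool := l == 'ú' || l == 't' || l == 'l'

-- A's per-character branch condition is membership in {'ú','t','l'}
theorem pvBranch (l : Char) :
    ((¬ (pvDicA.contains l) = true ∨ pvDicA.getD l true = false) ↔ pvIsTrue l = false) := by
  by_cases h1 : l = 'ú' <;> by_cases h2 : l = 't' <;> by_cases h3 : l = 'l' <;>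
    by_cases h4 : l = 'i' <;> by_cases h5 : l = 'r' <;> by_cases h6 : l = 's' <;>
    by_cases h7 : l = 'e' <;> by_cases h8 : l = 'a' <;>
    simp_all [pvDicA, pvIsTrue, PySem.Dict.contains, PySem.Dict.getD, PySem.Dict.get?,
      PySem.Dict.insert, PySem.Dict.empty] <;> tauto

-- A's counting loop computes (countP pvIsTrue, length - countP pvIsTrue)
theorem pvLoopA (xs : List Char) (a b : Int) :
    xs.foldl (fun (c : Int × Int) l =>
      if ¬ (pvDicA.contains l) = true ∨ pvDicA.getD l true = false then (c.1, c.2 + 1)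
      else (c.1 + 1, c.2)) (a, b)
    = (a + (xs.countP pvIsTrue : Int), b + ((xs.length : Int) - (xs.countP pvIsTrue : Int))) := by
  induction xs generalizing a b with
  | nil => simp
  | cons x xs ih =>
    have hx := pvBranch x
    by_cases h : pvIsTrue x = true
    · rw [List.foldl_cons, if_neg (by rw [hx]; simp [h]), ih]
      have hc : (x :: xs).countP pvIsTrue = xs.countP pvIsTrue + 1 := by
        simp [List.countP_cons, h]
      rw [hc, List.length_cons, Prod.mk.injEq]
      constructor <;> (push_cast; ring)
    · rw [Bool.not_eq_true] at h
      rw [List.foldl_cons, if_pos (by rw [hx]; exact h), ih]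
      have hc : (x :: xs).countP pvIsTrue = xs.countP pvIsTrue := by
        simp [List.countP_cons, h]
      rw [hc, List.length_cons, Prod.mk.injEq]
      constructor <;> (push_cast; ring)

-- B's frequency table: each lookup is the multiset count
theorem pvFreq (xs : List Char) (v : Char) :
    (xs.foldl (fun d c => d.insert c (d.getD c 0 + 1)) PySem.Dict.empty).getD v 0
      = (xs.count v : Int) := by
  simpa using PySem.Dict.getD_foldl_insert_add_one (l := xs) (d := PySem.Dict.empty) (v := v)

-- counting membership in the three-letter set = summing the three counts
theorem pvCountSplit (xs : List Char) :
    (xs.countP pvIsTrue : Int) = (xs.count 'ú' : Int) + (xs.count 't' : Int) + (xs.count 'l' : Int) := by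
  induction xs with
  | nil => simp
  | cons x xs ih =>
    simp only [List.countP_cons, List.count_cons, pvIsTrue] at *
    by_cases h1 : x = 'ú' <;> by_cases h2 : x = 't' <;> by_cases h3 : x = 'l' <;>
      simp_all <;> push_cast <;> omega

-- ===== VERDICT (by name: the statement is the Claim_ definition above) =====
set_option maxHeartbeats 1000000 in
theorem sameLetters_spec : Claim_equal_sameLetters := by
  intro X _
  show sameLetters X = sameLetters_alt X
  show decide ((X.toList.foldl (fun (c : Int × Int) l =>
      if ¬ (pvDicA.contains l) = true ∨ pvDicA.getD l true = false then (c.1, c.2 + 1)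
      else (c.1 + 1, c.2)) (0, 0)).1 >
    (X.toList.foldl (fun (c : Int × Int) l =>
      if ¬ (pvDicA.contains l) = true ∨ pvDicA.getD l true = false then (c.1, c.2 + 1)
      else (c.1 + 1, c.2)) (0, 0)).2)
    = sameLetters_alt X
  rw [pvLoopA]
  simp only [sameLetters_alt]
  rw [pvFreq, pvFreq, pvFreq]
  simp [pvCountSplit, PySem.Str.len_eq]
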